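-- pv_equiv track=rewrite | github.com/ytl001G/Baekjoon | 프로그래머스/lv1/42862. 체육복/체육복.py | solution
-- ===== SOURCE A (Python) =====
-- def solution(n, lost, reserve):
--     reserve_used = []
--
--     ans = 0
--     for i in range(1,n+1):
--         if i in lost:
--             if i in reserve:
--                 ans += 1
--
--             else:
--                 if i-1 in reserve and i-1 not in lost and i-1 not in reserve_used:
--                     reserve_used.append(i-1)
--                     ans += 1
--                 elif i+1 in reserve and i+1 not in lost and i+1 not in reserve_used:
--                     reserve_used.append(i+1)
--                     ans += 1
--
--         else:
--             ans += 1
--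
--     return ans
-- ===== SOURCE B (Python) =====
-- def solution(n, lost, reserve):
--     lost_set = set(lost)
--     have_reserve = set(reserve)
--     spare = have_reserve - lost_set
--     bad = 0
--     for i in sorted(lost_set):
--         if 1 <= i <= n and i not in have_reserve:
--             if i - 1 in spare:
--                 spare.discard(i - 1)
--             elif i + 1 in spare:
--                 spare.discard(i + 1)
--             else:
--                 bad += 1
--     return n - bad
-- ===== Notes on version B (the rewrite author's own statement) =====
-- stated objective: faster
-- what changed: Instead of scanning every student 1..n and doing linear 'in' scans over lost/reserve/used lists, B builds the sets lost, reserve and spare=reserve-lost once, iterates only over sorted(set(lost)) and consumes spare by set removal, returning n minus the unfixable lost students.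
-- outside the precondition, e.g. on solution(-2, [], []): A returns 0, B returns -2
import Mathlib
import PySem

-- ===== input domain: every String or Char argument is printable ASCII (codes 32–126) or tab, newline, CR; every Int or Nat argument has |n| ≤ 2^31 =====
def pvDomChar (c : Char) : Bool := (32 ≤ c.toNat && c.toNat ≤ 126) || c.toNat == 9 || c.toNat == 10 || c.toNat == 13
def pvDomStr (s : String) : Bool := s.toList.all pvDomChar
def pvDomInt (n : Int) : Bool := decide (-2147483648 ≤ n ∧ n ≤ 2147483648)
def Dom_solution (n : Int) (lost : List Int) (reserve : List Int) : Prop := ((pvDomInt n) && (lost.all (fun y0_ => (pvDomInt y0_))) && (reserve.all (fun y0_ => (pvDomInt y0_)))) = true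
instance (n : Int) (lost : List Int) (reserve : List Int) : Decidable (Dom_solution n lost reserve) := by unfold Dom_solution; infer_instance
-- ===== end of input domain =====

-- B replaces A's O(n·k) scan over all students (with linear membership tests) by set
-- arithmetic over sorted(set(lost)) and a consumable spare set; faster (asymptotic).

-- ===== PORT A =====
-- one iteration of A's for-loop; state = (reserve_used, ans)
def solutionStep (lost reserve : List Int) (st : List Int × Int) (i : Int) : List Int × Int :=
  if i ∈ lost then
    if i ∈ reserve then (st.1, st.2 + 1)
    else if (i-1) ∈ reserve ∧ (i-1) ∉ lost ∧ (i-1) ∉ st.1 then (st.1 ++ [i-1], st.2 + 1)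
    else if (i+1) ∈ reserve ∧ (i+1) ∉ lost ∧ (i+1) ∉ st.1 then (st.1 ++ [i+1], st.2 + 1)
    else st
  else (st.1, st.2 + 1)

def solution (n : Int) (lost : List Int) (reserve : List Int) : Int :=
  ((PySem.List.pyRange 1 (n+1) 1).foldl (solutionStep lost reserve) ([], 0)).2

-- ===== PORT B =====
-- one iteration of B's for-loop; state = (spare, bad)
def solutionAltStep (n : Int) (haveReserve : PySem.Set Int) (st : PySem.Set Int × Int) (i : Int) : PySem.Set Int × Int :=
  if 1 ≤ i ∧ i ≤ n ∧ i ∉ haveReserve then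
    if (i-1) ∈ st.1 then (PySem.Set.discard st.1 (i-1), st.2)
    else if (i+1) ∈ st.1 then (PySem.Set.discard st.1 (i+1), st.2)
    else (st.1, st.2 + 1)
  else st

def solution_alt (n : Int) (lost : List Int) (reserve : List Int) : Int :=
  let lostSet : PySem.Set Int := PySem.Set.ofList lost
  let haveReserve : PySem.Set Int := PySem.Set.ofList reserve
  let spare : PySem.Set Int := PySem.Set.diff haveReserve lostSet
  let bad := ((PySem.List.sorted lostSet (fun x => x) false).foldl (solutionAltStep n haveReserve) (spare, 0)).2
  n - bad

-- ===== PRECONDITION & SPEC =====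
-- Pre_ excludes negative n (a negative student count is outside the problem's natural
-- domain), where A's empty range returns 0 but B's 'n - bad' returns n.
def Pre_solution (n : Int) (lost : List Int) (reserve : List Int) : Prop := 0 ≤ n
instance (n : Int) (lost : List Int) (reserve : List Int) : Decidable (Pre_solution n lost reserve) := by unfold Pre_solution; infer_instance
def pvWitness_solution : Int × List Int × List Int := (4, [2, 3], [1, 3])

def Spec_solution (n : Int) (lost : List Int) (reserve : List Int) (out : Int) : Prop := out = solution_alt n lost reserve
instance (n : Int) (lost : List Int) (reserve : List Int) (out : Int) : Decidable (Spec_solution n lost reserve out) := by unfold Spec_solution; infer_instance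

-- ===== CLAIM (what is proved, stated in full; the proofs are below) =====
def Claim_equal_solution : Prop := ∀ (n : Int) (lost : List Int) (reserve : List Int), Dom_solution n lost reserve → Pre_solution n lost reserve → Spec_solution n lost reserve (solution n lost reserve)

-- ===== LEMMAS AND PROOFS =====

-- the neighbour A's loop body borrows for a lost student i (none = nobody)
def borrow (lost reserve used : List Int) (i : Int) : Option Int :=
  if (i-1) ∈ reserve ∧ (i-1) ∉ lost ∧ (i-1) ∉ used then some (i-1)
  else if (i+1) ∈ reserve ∧ (i+1) ∉ lost ∧ (i+1) ∉ used then some (i+1)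
  else none

-- A's loop body restricted to the interesting students (i ∈ lost, i ∉ reserve)
def coreA (lost reserve : List Int) (st : List Int × Int) (i : Int) : List Int × Int :=
  match borrow lost reserve st.1 i with
  | some x => (st.1 ++ [x], st.2 + 1)
  | none => st

-- B's loop body with the guard stripped
def coreB (st : PySem.Set Int × Int) (i : Int) : PySem.Set Int × Int :=
  if (i-1) ∈ st.1 then (PySem.Set.discard st.1 (i-1), st.2)
  else if (i+1) ∈ st.1 then (PySem.Set.discard st.1 (i+1), st.2)
  else (st.1, st.2 + 1)

def pb (lost reserve : List Int) (i : Int) : Bool := decide (i ∈ lost ∧ i ∉ reserve)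

-- spare mirrors reserve minus lost minus used
def InvBR (lost reserve used : List Int) (spare : PySem.Set Int) : Prop :=
  ∀ x, x ∈ spare ↔ (x ∈ reserve ∧ x ∉ lost ∧ x ∉ used)

theorem stepA_of_pb {lost reserve : List Int} {i : Int} (h : pb lost reserve i = true)
    (st : List Int × Int) : solutionStep lost reserve st i = coreA lost reserve st i := by
  simp only [pb, decide_eq_true_eq] at h
  simp only [solutionStep, coreA, borrow, if_pos h.1, if_neg h.2]
  split_ifs <;> rfl

theorem stepA_of_not_pb {lost reserve : List Int} {i : Int} (h : pb lost reserve i = false)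
    (st : List Int × Int) : solutionStep lost reserve st i = (st.1, st.2 + 1) := by
  simp only [pb, decide_eq_false_iff_not, not_and, not_not] at h
  by_cases hl : i ∈ lost
  · simp [solutionStep, hl, h hl]
  · simp [solutionStep, hl]

theorem coreA_shift (lost reserve : List Int) (u : List Int) (a c : Int) (i : Int) :
    coreA lost reserve (u, a + c) i
      = ((coreA lost reserve (u, a) i).1, (coreA lost reserve (u, a) i).2 + c) := by
  simp only [coreA]
  cases borrow lost reserve u i <;> simp <;> ring

theorem foldA_eq_core (lost reserve : List Int) :
    ∀ (xs : List Int) (u : List Int) (a : Int),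
      xs.foldl (solutionStep lost reserve) (u, a)
        = (xs.filter (pb lost reserve)).foldl (coreA lost reserve)
            (u, a + ((xs.countP (fun i => !(pb lost reserve i))) : Int)) := by
  intro xs
  induction xs with
  | nil => intro u a; simp
  | cons i t ih =>
    intro u a
    by_cases hp : pb lost reserve i = true
    · have h1 : (i :: t).filter (pb lost reserve) = i :: t.filter (pb lost reserve) := by
        simp [hp]
      have h2 : (i :: t).countP (fun i => !(pb lost reserve i)) = t.countP (fun i => !(pb lost reserve i)) := by
        simp [hp]
      rcases hca : coreA lost reserve (u, a) i with ⟨u₁, a₁⟩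
      have hshift : coreA lost reserve (u, a + ((t.countP (fun i => !(pb lost reserve i))) : Int)) i
          = (u₁, a₁ + ((t.countP (fun i => !(pb lost reserve i))) : Int)) := by
        rw [coreA_shift, hca]
      rw [h1, h2, List.foldl_cons, List.foldl_cons, stepA_of_pb hp, hca, hshift, ih u₁ a₁]
    · have hp' : pb lost reserve i = false := by simpa using hp
      have h1 : (i :: t).filter (pb lost reserve) = t.filter (pb lost reserve) := by
        simp [hp']
      have h2 : ((i :: t).countP (fun i => !(pb lost reserve i)) : Int)
          = (t.countP (fun i => !(pb lost reserve i)) : Int) + 1 := by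
        simp [hp']
      rw [h1, h2, List.foldl_cons, stepA_of_not_pb hp', ih]
      ring_nf

theorem inv_preserve {lost reserve used : List Int} {spare : PySem.Set Int} (h : InvBR lost reserve used spare)
    (x : Int) : InvBR lost reserve (used ++ [x]) (PySem.Set.discard spare x) := by
  intro y
  rw [PySem.Set.mem_discard, h y]
  simp [List.mem_append]
  tauto

theorem sum_core (lost reserve : List Int) :
    ∀ (F : List Int) (u : List Int) (s : PySem.Set Int) (a b : Int), InvBR lost reserve u s →
      (F.foldl (coreA lost reserve) (u, a)).2 + (F.foldl coreB (s, b)).2 = a + b + F.length := by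
  intro F
  induction F with
  | nil => intro u s a b _; simp
  | cons i t ih =>
    intro u s a b hinv
    have hm1 : (i-1) ∈ s ↔ ((i-1) ∈ reserve ∧ (i-1) ∉ lost ∧ (i-1) ∉ u) := hinv (i-1)
    have hm2 : (i+1) ∈ s ↔ ((i+1) ∈ reserve ∧ (i+1) ∉ lost ∧ (i+1) ∉ u) := hinv (i+1)
    rw [List.foldl_cons, List.foldl_cons]
    by_cases h1 : (i-1) ∈ s
    · have hb : borrow lost reserve u i = some (i-1) := by
        simp only [borrow, if_pos (hm1.mp h1)]
      have hA : coreA lost reserve (u, a) i = (u ++ [i-1], a + 1) := by simp [coreA, hb]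
      have hB : coreB (s, b) i = (PySem.Set.discard s (i-1), b) := by simp [coreB, h1]
      rw [hA, hB, ih _ _ _ _ (inv_preserve hinv (i-1))]
      simp; ring
    · by_cases h2 : (i+1) ∈ s
      · have hc1 : ¬ ((i-1) ∈ reserve ∧ (i-1) ∉ lost ∧ (i-1) ∉ u) := fun hc => h1 (hm1.mpr hc)
        have hb : borrow lost reserve u i = some (i+1) := by
          simp only [borrow, if_neg hc1, if_pos (hm2.mp h2)]
        have hA : coreA lost reserve (u, a) i = (u ++ [i+1], a + 1) := by simp [coreA, hb]
        have hB : coreB (s, b) i = (PySem.Set.discard s (i+1), b) := by simp [coreB, h1, h2]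
        rw [hA, hB, ih _ _ _ _ (inv_preserve hinv (i+1))]
        simp; ring
      · have hc1 : ¬ ((i-1) ∈ reserve ∧ (i-1) ∉ lost ∧ (i-1) ∉ u) := fun hc => h1 (hm1.mpr hc)
        have hc2 : ¬ ((i+1) ∈ reserve ∧ (i+1) ∉ lost ∧ (i+1) ∉ u) := fun hc => h2 (hm2.mpr hc)
        have hb : borrow lost reserve u i = none := by
          simp only [borrow, if_neg hc1, if_neg hc2]
        have hA : coreA lost reserve (u, a) i = (u, a) := by simp [coreA, hb]
        have hB : coreB (s, b) i = (s, b + 1) := by simp [coreB, h1, h2]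
        rw [hA, hB, ih _ _ _ _ hinv]
        simp; ring

theorem filters_eq (n : Int) (lost reserve : List Int) :
    (PySem.List.pyRange 1 (n+1) 1).filter (pb lost reserve)
      = (PySem.List.sorted (PySem.Set.ofList lost) (fun x => x) false).filter
          (fun i => decide (1 ≤ i ∧ i ≤ n ∧ i ∉ PySem.Set.ofList reserve)) := by
  have hpw1 : ((PySem.List.pyRange 1 (n+1) 1).filter (pb lost reserve)).Pairwise (· < ·) :=
    List.Pairwise.sublist List.filter_sublist (PySem.List.pairwise_lt_pyRange_one 1 (n+1))
  have hpw2 : ((PySem.List.sorted (PySem.Set.ofList lost) (fun x => x) false).filter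
      (fun i => decide (1 ≤ i ∧ i ≤ n ∧ i ∉ PySem.Set.ofList reserve))).Pairwise (· < ·) :=
    List.Pairwise.sublist List.filter_sublist (PySem.List.sorted_ofList_pairwise_lt lost)
  have hnd1 := hpw1.imp (fun h => ne_of_lt h)
  have hnd2 := hpw2.imp (fun h => ne_of_lt h)
  have hmem : ∀ x, x ∈ (PySem.List.pyRange 1 (n+1) 1).filter (pb lost reserve)
      ↔ x ∈ (PySem.List.sorted (PySem.Set.ofList lost) (fun x => x) false).filter
          (fun i => decide (1 ≤ i ∧ i ≤ n ∧ i ∉ PySem.Set.ofList reserve)) := by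
    intro x
    simp only [List.mem_filter, PySem.List.mem_pyRange_one, PySem.List.mem_sorted,
      PySem.Set.mem_ofList, pb, decide_eq_true_eq]
    constructor
    · rintro ⟨⟨hx1, hx2⟩, hx3, hx4⟩; exact ⟨hx3, hx1, by omega, hx4⟩
    · rintro ⟨hx3, hx1, hx2, hx4⟩; exact ⟨⟨hx1, by omega⟩, hx3, hx4⟩
  have hperm := (List.perm_ext_iff_of_nodup hnd1 hnd2).mpr hmem
  exact List.Perm.eq_of_pairwise (fun a b _ _ h1 h2 => by omega) hpw1 hpw2 hperm

theorem solution_eq_alt (n : Int) (lost reserve : List Int) (hn : 0 ≤ n) :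
    solution n lost reserve = solution_alt n lost reserve := by
  -- rewrite A through the core fold
  have hA := foldA_eq_core lost reserve (PySem.List.pyRange 1 (n+1) 1) [] 0
  -- rewrite B's guarded fold through the filtered core fold
  have hstep : (solutionAltStep n (PySem.Set.ofList reserve))
      = (fun (st : PySem.Set Int × Int) (i : Int) =>
          if 1 ≤ i ∧ i ≤ n ∧ i ∉ PySem.Set.ofList reserve then coreB st i else st) := by
    funext st i; simp only [solutionAltStep, coreB]
  have hB : (PySem.List.sorted (PySem.Set.ofList lost) (fun x => x) false).foldl
        (solutionAltStep n (PySem.Set.ofList reserve))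
        (PySem.Set.diff (PySem.Set.ofList reserve) (PySem.Set.ofList lost), 0)
      = ((PySem.List.sorted (PySem.Set.ofList lost) (fun x => x) false).filter
          (fun i => decide (1 ≤ i ∧ i ≤ n ∧ i ∉ PySem.Set.ofList reserve))).foldl coreB
          (PySem.Set.diff (PySem.Set.ofList reserve) (PySem.Set.ofList lost), 0) := by
    rw [hstep, PySem.List.foldl_ite_eq_foldl_filter]
  have hinv0 : InvBR lost reserve []
      (PySem.Set.diff (PySem.Set.ofList reserve) (PySem.Set.ofList lost)) := by
    intro x
    simp [PySem.Set.mem_diff, PySem.Set.mem_ofList]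
  set F := (PySem.List.pyRange 1 (n+1) 1).filter (pb lost reserve) with hF
  have hsum := sum_core lost reserve F []
      (PySem.Set.diff (PySem.Set.ofList reserve) (PySem.Set.ofList lost))
      (((PySem.List.pyRange 1 (n+1) 1).countP (fun i => !(pb lost reserve i))) : Int) 0 hinv0
  have hlen : ((PySem.List.pyRange 1 (n+1) 1).countP (fun i => !(pb lost reserve i)) : Int)
      + (F.length : Int) = n := by
    have h1 : F.length = (PySem.List.pyRange 1 (n+1) 1).countP (pb lost reserve) := by
      rw [hF, ← List.countP_eq_length_filter]
    have h2 : (PySem.List.pyRange 1 (n+1) 1).countP (pb lost reserve)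
        + (PySem.List.pyRange 1 (n+1) 1).countP (fun i => !(pb lost reserve i))
        = (PySem.List.pyRange 1 (n+1) 1).length := by
      have hfun : (fun a => decide (¬ pb lost reserve a = true)) = (fun i => !(pb lost reserve i)) := by
        funext a; cases pb lost reserve a <;> simp
      have h := List.length_eq_countP_add_countP (l := PySem.List.pyRange 1 (n+1) 1) (pb lost reserve)
      rw [hfun] at h
      omega
    have h3 : ((PySem.List.pyRange 1 (n+1) 1).length : Int) = n := by
      rw [PySem.List.length_pyRange_one]; omega
    omega
  simp only [solution, solution_alt, hA, hB, ← filters_eq n lost reserve, ← hF, zero_add] at *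
  omega

-- ===== VERDICT (by name: the statement is the Claim_ definition above) =====
theorem solution_spec : Claim_equal_solution := by
  intro n lost reserve _ hpre
  unfold Spec_solution
  exact solution_eq_alt n lost reserve hpre
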